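-- pv_equiv track=rewrite | github.com/natarajanrodrigues/AoC2020Python | Day24.py | translate_line
-- ===== SOURCE A (Python) =====
-- def translate_line(line):
--   result = []
--   last_char = ''
--   i = 0
--   while i < len(line):
--     if line[i] in ["w", "e"]:
--       result.append(line[i])
--     else:
--       result.append(line[i:i+2])
--       i += 1
--     i += 1
--
--   return result
-- ===== SOURCE B (Python) =====
-- def translate_line(line):
--   # Stage 1: compute the token boundary positions ("cuts").
--   cuts = [0]
--   while cuts[-1] < len(line):
--     cuts.append(cuts[-1] + (1 if line[cuts[-1]] in "ew" else 2))
--   # Stage 2: slice the line between consecutive cuts.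
--   return [line[a:b] for a, b in zip(cuts, cuts[1:])]
-- ===== Notes on version B (the rewrite author's own statement) =====
-- stated objective: alternative
-- what changed: Instead of emitting tokens while scanning, B first computes the list of token boundary positions (cuts) and then builds the tokens in a second pass by slicing the line between consecutive cuts with zip.
import Mathlib
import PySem

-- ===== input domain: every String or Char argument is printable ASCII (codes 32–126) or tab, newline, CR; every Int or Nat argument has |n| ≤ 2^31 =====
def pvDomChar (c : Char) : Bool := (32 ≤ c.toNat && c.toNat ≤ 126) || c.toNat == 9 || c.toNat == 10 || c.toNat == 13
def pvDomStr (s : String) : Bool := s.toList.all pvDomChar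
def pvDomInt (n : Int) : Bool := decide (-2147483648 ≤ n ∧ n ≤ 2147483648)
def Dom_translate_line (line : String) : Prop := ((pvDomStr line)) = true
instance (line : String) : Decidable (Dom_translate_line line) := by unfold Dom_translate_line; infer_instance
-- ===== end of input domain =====

-- B is a two-stage alternative: it first computes the token boundary positions, then slices the
-- line between consecutive boundaries, instead of emitting tokens during the scan (same cost).

-- ===== PORT A =====
-- A's while loop over index i: emit line[i] for 'w'/'e', else line[i:i+2] and skip an extra char.
def translate_lineLoop (cs : List Char) (i : Nat) (result : List String) : List String :=
  if h : i < cs.length then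
    if cs[i] = 'w' ∨ cs[i] = 'e' then
      translate_lineLoop cs (i + 1) (result ++ [String.mk [cs[i]]])
    else
      translate_lineLoop cs (i + 2) (result ++ [String.mk ((cs.drop i).take 2)])
  else result
termination_by cs.length - i

def translate_line (line : String) : List String :=
  translate_lineLoop line.toList 0 []

-- ===== PORT B =====
-- B stage 1: while cuts[-1] < len(line), append cuts[-1] + (1 if line[cuts[-1]] in "ew" else 2).
def cutsLoop (cs : List Char) (cuts : List Nat) : List Nat :=
  let last := cuts.getLastD 0
  if h : last < cs.length then
    cutsLoop cs (cuts ++ [last + (if cs[last] = 'e' ∨ cs[last] = 'w' then 1 else 2)])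
  else cuts
termination_by cs.length - cuts.getLastD 0
decreasing_by
  simp only [List.getLastD_concat]
  split <;> omega

-- B stage 2: [line[a:b] for a, b in zip(cuts, cuts[1:])] (slice with 0 ≤ a ≤ b: drop a, take b-a).
def translate_line_alt (line : String) : List String :=
  let cs := line.toList
  let cuts := cutsLoop cs [0]
  (cuts.zip cuts.tail).map (fun p => String.mk ((cs.drop p.1).take (p.2 - p.1)))

-- ===== PRECONDITION & SPEC =====
def Spec_translate_line (line : String) (out : List String) : Prop := out = translate_line_alt line
instance (line : String) (out : List String) : Decidable (Spec_translate_line line out) := by unfold Spec_translate_line; infer_instance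

-- ===== CLAIM (what is proved, stated in full; the proofs are below) =====
def Claim_equal_translate_line : Prop := ∀ (line : String), Dom_translate_line line → Spec_translate_line line (translate_line line)

-- ===== LEMMAS AND PROOFS =====

-- Reference tokenizer: the token stream starting at position i.
def tokensFrom (cs : List Char) (i : Nat) : List String :=
  if h : i < cs.length then
    if cs[i] = 'w' ∨ cs[i] = 'e' then
      String.mk [cs[i]] :: tokensFrom cs (i + 1)
    else
      String.mk ((cs.drop i).take 2) :: tokensFrom cs (i + 2)
  else []
termination_by cs.length - i

-- Reference cut stream: the boundary positions strictly after i.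
def cutsFrom (cs : List Char) (i : Nat) : List Nat :=
  if h : i < cs.length then
    (i + (if cs[i] = 'e' ∨ cs[i] = 'w' then 1 else 2)) ::
      cutsFrom cs (i + (if cs[i] = 'e' ∨ cs[i] = 'w' then 1 else 2))
  else []
termination_by cs.length - i
decreasing_by split <;> omega

theorem translate_lineLoop_eq (cs : List Char) (i : Nat) (result : List String) :
    translate_lineLoop cs i result = result ++ tokensFrom cs i := by
  by_cases h : i < cs.length
  · by_cases hc : cs[i] = 'w' ∨ cs[i] = 'e'
    · conv_rhs => rw [tokensFrom]
      rw [translate_lineLoop]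
      simp only [dif_pos h, if_pos hc]
      rw [translate_lineLoop_eq cs (i + 1), List.append_assoc]
      rfl
    · conv_rhs => rw [tokensFrom]
      rw [translate_lineLoop]
      simp only [dif_pos h, if_neg hc]
      rw [translate_lineLoop_eq cs (i + 2), List.append_assoc]
      rfl
  · conv_rhs => rw [tokensFrom]
    rw [translate_lineLoop]
    simp only [dif_neg h, List.append_nil]
termination_by cs.length - i

theorem cutsLoop_eq (cs : List Char) (cuts : List Nat) :
    cutsLoop cs cuts = cuts ++ cutsFrom cs (cuts.getLastD 0) := by
  by_cases h : cuts.getLastD 0 < cs.length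
  · conv_rhs => rw [cutsFrom]
    rw [cutsLoop]
    simp only [dif_pos h]
    rw [cutsLoop_eq cs _, List.getLastD_concat, List.append_assoc]
    rfl
  · conv_rhs => rw [cutsFrom]
    rw [cutsLoop]
    simp only [dif_neg h, List.append_nil]
termination_by cs.length - cuts.getLastD 0
decreasing_by
  simp only [List.getLastD_concat]
  split <;> omega

theorem zip_cuts_eq_tokens (cs : List Char) (i : Nat) :
    (((i :: cutsFrom cs i).zip (cutsFrom cs i)).map
      (fun p => String.mk ((cs.drop p.1).take (p.2 - p.1)))) = tokensFrom cs i := by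
  by_cases h : i < cs.length
  · rw [cutsFrom, dif_pos h, tokensFrom, dif_pos h]
    by_cases hc : cs[i] = 'e' ∨ cs[i] = 'w'
    · rw [if_pos hc, if_pos (Or.symm hc)]
      have := zip_cuts_eq_tokens cs (i + 1)
      rw [cutsFrom] at this ⊢
      simp only [List.zip_cons_cons, List.map_cons, this]
      congr 1
      have : i + 1 - i = 1 := by omega
      rw [this]
      have hdrop : cs.drop i = cs[i] :: cs.drop (i + 1) := (List.drop_eq_getElem_cons h)
      rw [hdrop]
      rfl
    · have hc' : ¬ (cs[i] = 'w' ∨ cs[i] = 'e') := fun h' => hc (Or.symm h')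
      rw [if_neg hc, if_neg hc']
      have := zip_cuts_eq_tokens cs (i + 2)
      rw [cutsFrom] at this ⊢
      simp only [List.zip_cons_cons, List.map_cons, this]
      congr 1
      have h2 : i + 2 - i = 2 := by omega
      rw [h2]
  · rw [cutsFrom, dif_neg h, tokensFrom, dif_neg h]
    rfl
termination_by cs.length - i
decreasing_by all_goals omega

-- ===== VERDICT (by name: the statement is the Claim_ definition above) =====
theorem translate_line_spec : Claim_equal_translate_line := by
  intro line _
  unfold Spec_translate_line translate_line translate_line_alt
  rw [translate_lineLoop_eq, List.nil_append]
  dsimp only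
  rw [cutsLoop_eq]
  simp only [List.getLastD, List.singleton_append, List.tail_cons]
  exact (zip_cuts_eq_tokens line.toList 0).symm
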